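-- pv_equiv track=rewrite | github.com/Leonard-Don/super-pricing-system | backend/app/services/quant_lab.py | _resolve_dispatch_status
-- ===== SOURCE A (Python) =====
-- from typing import Any, Dict, Iterable, List, Optional
--
-- def _resolve_dispatch_status(cascade_results: List[Dict[str, Any]]) -> str:
--     if not cascade_results:
--         return "no_actions"
--     if any(result.get("status") in {"failed"} for result in cascade_results):
--         return "degraded"
--     if any(result.get("status") in {"sent", "created", "stored", "dry_run", "queued"} for result in cascade_results):
--         return "dispatched"
--     return "pending"
-- ===== SOURCE B (Python) =====
-- def _resolve_dispatch_status(cascade_results):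
--     if not cascade_results:
--         return "no_actions"
--     saw_dispatch = False
--     for result in cascade_results:
--         status = result.get("status")
--         if status in {"failed"}:
--             return "degraded"
--         elif status in {"sent", "created", "stored", "dry_run", "queued"}:
--             saw_dispatch = True
--     return "dispatched" if saw_dispatch else "pending"
-- ===== Notes on version B (the rewrite author's own statement) =====
-- stated objective: alternative
-- what changed: Replaces A's two separate any() scans over the list with a single pass that returns 'degraded' on the first failed status and otherwise maintains a saw_dispatch flag.
import Mathlib
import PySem

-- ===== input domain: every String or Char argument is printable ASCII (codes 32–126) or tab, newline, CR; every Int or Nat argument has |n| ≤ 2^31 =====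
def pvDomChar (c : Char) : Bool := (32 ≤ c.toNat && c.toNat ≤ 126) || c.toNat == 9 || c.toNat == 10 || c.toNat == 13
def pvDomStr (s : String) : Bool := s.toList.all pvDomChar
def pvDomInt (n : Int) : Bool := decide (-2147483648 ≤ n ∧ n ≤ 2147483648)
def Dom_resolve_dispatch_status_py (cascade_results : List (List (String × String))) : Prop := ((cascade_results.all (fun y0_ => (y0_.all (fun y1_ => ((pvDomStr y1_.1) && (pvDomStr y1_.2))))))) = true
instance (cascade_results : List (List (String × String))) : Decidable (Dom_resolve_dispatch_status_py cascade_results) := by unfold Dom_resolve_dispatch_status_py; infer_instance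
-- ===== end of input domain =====

-- B replaces A's two any() scans with a single pass keeping a saw_dispatch flag (alternative decomposition, same cost).

-- ===== PORT A =====
-- result.get("status"): first match in the association list, none if absent
def pvStatusGet (r : List (String × String)) : Option String :=
  (r.find? (fun p => p.1 == "status")).map (·.2)

def resolve_dispatch_status_py (cascade_results : List (List (String × String))) : String :=
  if cascade_results = [] then "no_actions"
  else if cascade_results.any (fun r => pvStatusGet r = some "failed") then "degraded"
  else if cascade_results.any (fun r => pvStatusGet r ∈ [some "sent", some "created", some "stored", some "dry_run", some "queued"]) then "dispatched"
  else "pending"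

-- ===== PORT B =====
-- the single-pass loop of Source B: returns "degraded" at the first failed status, else remembers saw_dispatch
def pvDispatchLoop (xs : List (List (String × String))) (saw : Bool) : String :=
  match xs with
  | [] => if saw then "dispatched" else "pending"
  | r :: rest =>
    let s := pvStatusGet r
    if s = some "failed" then "degraded"
    else if s ∈ [some "sent", some "created", some "stored", some "dry_run", some "queued"] then pvDispatchLoop rest true
    else pvDispatchLoop rest saw

def resolve_dispatch_status_py_alt (cascade_results : List (List (String × String))) : String :=
  if cascade_results = [] then "no_actions"
  else pvDispatchLoop cascade_results false

-- ===== PRECONDITION & SPEC =====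
def Spec_resolve_dispatch_status_py (cascade_results : List (List (String × String))) (out : String) : Prop := out = resolve_dispatch_status_py_alt cascade_results
instance (cascade_results : List (List (String × String))) (out : String) : Decidable (Spec_resolve_dispatch_status_py cascade_results out) := by unfold Spec_resolve_dispatch_status_py; infer_instance

-- ===== CLAIM (what is proved, stated in full; the proofs are below) =====
def Claim_equal_resolve_dispatch_status_py : Prop := ∀ (cascade_results : List (List (String × String))), Dom_resolve_dispatch_status_py cascade_results → Spec_resolve_dispatch_status_py cascade_results (resolve_dispatch_status_py cascade_results)

-- ===== LEMMAS AND PROOFS =====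
theorem pvDispatchLoop_charac (xs : List (List (String × String))) (saw : Bool) :
    pvDispatchLoop xs saw =
      if xs.any (fun r => pvStatusGet r = some "failed") then "degraded"
      else if (xs.any (fun r => pvStatusGet r ∈ [some "sent", some "created", some "stored", some "dry_run", some "queued"]) || saw) then "dispatched"
      else "pending" := by
  induction xs generalizing saw with
  | nil => simp [pvDispatchLoop]
  | cons r rest ih =>
    simp only [pvDispatchLoop, List.any_cons]
    by_cases hf : pvStatusGet r = some "failed"
    · simp [hf]
    · by_cases hd : pvStatusGet r ∈ [some "sent", some "created", some "stored", some "dry_run", some "queued"]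
      · simp [hf, hd, ih]
      · simp [hf, hd, ih]

-- ===== VERDICT (by name: the statement is the Claim_ definition above) =====
theorem resolve_dispatch_status_py_spec : Claim_equal_resolve_dispatch_status_py := by
  intro xs _
  unfold Spec_resolve_dispatch_status_py resolve_dispatch_status_py resolve_dispatch_status_py_alt
  by_cases h : xs = []
  · simp [h]
  · simp only [h, pvDispatchLoop_charac, Bool.or_false]
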